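-- pv_equiv track=rewrite | github.com/UdeS-CoBIUS/G4Evolution | scriptsTrees/orthologyGraph.py | getGrpSpOrthoGrp
-- ===== SOURCE A (Python) =====
-- def getGrpSpOrthoGrp(geneList, dicoGrpSp, dicoSpGene):
-- 	"""Retrieve for a group of orthologs the living kingdom each genes are from.
--
-- 	This function allow us to find for a group of orthologs, all the species
-- 	group from the genes inside that ortholog group. It will allow us to check
-- 	the number of genes for each sub grp and be more faire on choosing thresholds.
--
-- 	:param geneList: list of gene from the ortholog group.
-- 	:type geneList: list
-- 	:param dicoGrpSp: {sp : group}.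
-- 	:type dicoGrpSp: dictionary
-- 	:param dicoSpGene: {gene : sp}.
-- 	:type dicoSpGene: dictionary
--
-- 	:returns: name of the species group that genes are in
--     :rtype: string
-- 	"""
-- 	dicoTree = {}
-- 	dicoGrp = {'Archaea': [], 'Bacteria': [], 'Eukaryota': []}
--
-- 	for g in geneList:
-- 		if g in dicoSpGene:
-- 			sp = dicoSpGene[g]
-- 			grp = dicoGrpSp[sp]
-- 			dicoGrp[grp].append(sp)
-- 	for grp in dicoGrp:
-- 		dicoGrp[grp] = len(list(set(dicoGrp[grp])))
--
-- 	if dicoGrp['Archaea'] > 0 and dicoGrp['Bacteria'] > 0 and dicoGrp['Eukaryota'] > 0: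
-- 		return 'ArcBacEuk'
-- 	elif dicoGrp['Archaea'] > 0 and dicoGrp['Bacteria'] > 0 and dicoGrp['Eukaryota'] == 0:
-- 		return 'ArcBac'
-- 	elif dicoGrp['Archaea'] == 0 and dicoGrp['Bacteria'] > 0 and dicoGrp['Eukaryota'] > 0:
-- 		return 'BacEuk'
-- 	elif dicoGrp['Archaea'] > 0 and dicoGrp['Bacteria'] == 0 and dicoGrp['Eukaryota'] > 0:
-- 		return 'ArcEuk'
-- 	elif dicoGrp['Archaea'] > 0 and dicoGrp['Bacteria'] == 0 and dicoGrp['Eukaryota'] == 0: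
-- 		return 'Arc'
-- 	elif dicoGrp['Archaea'] == 0 and dicoGrp['Bacteria'] > 0 and dicoGrp['Eukaryota'] == 0:
-- 		return 'Bac'
-- 	elif dicoGrp['Archaea'] == 0 and dicoGrp['Bacteria'] == 0 and dicoGrp['Eukaryota'] > 0:
-- 		return 'Euk'
-- ===== SOURCE B (Python) =====
-- def getGrpSpOrthoGrp(geneList, dicoGrpSp, dicoSpGene):
--     present = set()
--     for g in geneList:
--         if g in dicoSpGene:
--             present.add(dicoGrpSp[dicoSpGene[g]])
--     res = ''.join(abbr for king, abbr in (('Archaea', 'Arc'), ('Bacteria', 'Bac'), ('Eukaryota', 'Euk')) if king in present)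
--     return res if res else None
-- ===== Notes on version B (the rewrite author's own statement) =====
-- stated objective: simpler
-- what changed: Instead of accumulating per-kingdom species lists in a dict, deduplicating them and dispatching over a 7-branch if/elif chain on the three counts, B keeps one set of kingdoms seen during a single pass and concatenates 'Arc'/'Bac'/'Euk' for the present ones, returning None when the string is empty.
import Mathlib
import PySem

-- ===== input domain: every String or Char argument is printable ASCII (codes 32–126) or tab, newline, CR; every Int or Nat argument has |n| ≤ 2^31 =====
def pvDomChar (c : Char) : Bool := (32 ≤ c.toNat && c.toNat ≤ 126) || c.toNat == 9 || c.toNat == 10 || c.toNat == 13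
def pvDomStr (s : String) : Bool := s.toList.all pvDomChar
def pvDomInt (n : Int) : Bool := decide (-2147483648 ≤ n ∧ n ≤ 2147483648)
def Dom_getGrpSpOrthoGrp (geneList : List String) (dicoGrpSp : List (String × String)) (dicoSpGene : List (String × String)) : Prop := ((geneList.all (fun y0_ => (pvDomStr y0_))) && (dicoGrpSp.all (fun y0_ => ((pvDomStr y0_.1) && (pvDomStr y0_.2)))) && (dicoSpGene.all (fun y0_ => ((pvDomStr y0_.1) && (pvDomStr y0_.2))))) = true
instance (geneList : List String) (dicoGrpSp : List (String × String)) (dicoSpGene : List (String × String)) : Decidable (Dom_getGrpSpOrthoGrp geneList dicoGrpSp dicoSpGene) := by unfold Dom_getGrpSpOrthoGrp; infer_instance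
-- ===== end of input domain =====

-- B replaces A's dict of per-kingdom species lists + dedup + 7-branch if/elif chain by a
-- single set of kingdoms seen and a concatenation of the present abbreviations (simpler).


-- ===== PORT A =====
-- one iteration of A's 'for g in geneList' loop; the 'none' fall-throughs are the
-- inputs where Python raises KeyError (dicoGrpSp[sp] / dicoGrp[grp]) — excluded by Pre_
def aStep (dicoGrpSp dicoSpGene : List (String × String))
    (d : PySem.Dict String (List String)) (g : String) : PySem.Dict String (List String) :=
  match List.lookup g dicoSpGene with
  | none => d
  | some sp =>
    match List.lookup sp dicoGrpSp with
    | none => d            -- KeyError in Python: outside Pre_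
    | some grp =>
      match d.get? grp with
      | none => d          -- KeyError in Python: outside Pre_
      | some l => d.insert grp (l ++ [sp])

def getGrpSpOrthoGrp (geneList : List String) (dicoGrpSp : List (String × String)) (dicoSpGene : List (String × String)) : Option String :=
  let dicoGrp0 : PySem.Dict String (List String) :=
    PySem.Dict.mk [("Archaea", []), ("Bacteria", []), ("Eukaryota", [])]
  let dicoGrp1 := geneList.foldl (aStep dicoGrpSp dicoSpGene) dicoGrp0
  -- for grp in dicoGrp: dicoGrp[grp] = len(list(set(dicoGrp[grp])))
  let dicoGrp : PySem.Dict String Int :=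
    PySem.Dict.mk (dicoGrp1.items.map (fun p => (p.1, ((PySem.Set.ofList p.2).length : Int))))
  let a := dicoGrp.getD "Archaea" 0
  let b := dicoGrp.getD "Bacteria" 0
  let e := dicoGrp.getD "Eukaryota" 0
  if a > 0 ∧ b > 0 ∧ e > 0 then some "ArcBacEuk"
  else if a > 0 ∧ b > 0 ∧ e = 0 then some "ArcBac"
  else if a = 0 ∧ b > 0 ∧ e > 0 then some "BacEuk"
  else if a > 0 ∧ b = 0 ∧ e > 0 then some "ArcEuk"
  else if a > 0 ∧ b = 0 ∧ e = 0 then some "Arc"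
  else if a = 0 ∧ b > 0 ∧ e = 0 then some "Bac"
  else if a = 0 ∧ b = 0 ∧ e > 0 then some "Euk"
  else none

-- ===== PORT B =====
-- one iteration of B's loop: mark the kingdom of g's species as present
def bStep (dicoGrpSp dicoSpGene : List (String × String))
    (s : PySem.Set String) (g : String) : PySem.Set String :=
  match List.lookup g dicoSpGene with
  | none => s
  | some sp =>
    match List.lookup sp dicoGrpSp with
    | none => s            -- KeyError in Python: outside Pre_
    | some grp => PySem.Set.add s grp

def getGrpSpOrthoGrp_alt (geneList : List String) (dicoGrpSp : List (String × String)) (dicoSpGene : List (String × String)) : Option String :=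
  let present := geneList.foldl (bStep dicoGrpSp dicoSpGene) PySem.Set.empty
  let res := PySem.Str.join ""
    ((([("Archaea", "Arc"), ("Bacteria", "Bac"), ("Eukaryota", "Euk")].filter
        (fun p => PySem.Set.contains present p.1))).map (·.2))
  if res == "" then none else some res

-- ===== PRECONDITION & SPEC =====
-- Pre_ excludes exactly the inputs where A raises KeyError: some listed gene whose species
-- is missing from dicoGrpSp, or whose group is not one of the three kingdom keys of dicoGrp.
def Pre_getGrpSpOrthoGrp (geneList : List String) (dicoGrpSp : List (String × String)) (dicoSpGene : List (String × String)) : Prop :=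
  ∀ g ∈ geneList,
    ((List.lookup g dicoSpGene).all (fun sp =>
      (List.lookup sp dicoGrpSp == some "Archaea") ||
      (List.lookup sp dicoGrpSp == some "Bacteria") ||
      (List.lookup sp dicoGrpSp == some "Eukaryota"))) = true

instance (geneList : List String) (dicoGrpSp : List (String × String)) (dicoSpGene : List (String × String)) : Decidable (Pre_getGrpSpOrthoGrp geneList dicoGrpSp dicoSpGene) := by
  unfold Pre_getGrpSpOrthoGrp; infer_instance

def pvWitness_getGrpSpOrthoGrp : List String × (List (String × String)) × (List (String × String)) :=
  (["g1", "g2", "g3"],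
   [("sp1", "Archaea"), ("sp2", "Bacteria")],
   [("g1", "sp1"), ("g2", "sp2")])

def Spec_getGrpSpOrthoGrp (geneList : List String) (dicoGrpSp : List (String × String)) (dicoSpGene : List (String × String)) (out : Option String) : Prop := out = getGrpSpOrthoGrp_alt geneList dicoGrpSp dicoSpGene
instance (geneList : List String) (dicoGrpSp : List (String × String)) (dicoSpGene : List (String × String)) (out : Option String) : Decidable (Spec_getGrpSpOrthoGrp geneList dicoGrpSp dicoSpGene out) := by unfold Spec_getGrpSpOrthoGrp; infer_instance

-- ===== CLAIM (what is proved, stated in full; the proofs are below) =====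
def Claim_equal_getGrpSpOrthoGrp : Prop := ∀ (geneList : List String) (dicoGrpSp : List (String × String)) (dicoSpGene : List (String × String)), Dom_getGrpSpOrthoGrp geneList dicoGrpSp dicoSpGene → Pre_getGrpSpOrthoGrp geneList dicoGrpSp dicoSpGene → Spec_getGrpSpOrthoGrp geneList dicoGrpSp dicoSpGene (getGrpSpOrthoGrp geneList dicoGrpSp dicoSpGene)


-- ===== LEMMAS AND PROOFS =====

-- the three-key dict keeps its shape under A's insert
theorem ins3_arc (la lb le v : List String) :
    (PySem.Dict.mk [("Archaea", la), ("Bacteria", lb), ("Eukaryota", le)]).insert "Archaea" v =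
    PySem.Dict.mk [("Archaea", v), ("Bacteria", lb), ("Eukaryota", le)] := by
  apply PySem.Dict.ext
  rw [PySem.Dict.items_insert_of_contains] <;> simp

theorem ins3_bac (la lb le v : List String) :
    (PySem.Dict.mk [("Archaea", la), ("Bacteria", lb), ("Eukaryota", le)]).insert "Bacteria" v =
    PySem.Dict.mk [("Archaea", la), ("Bacteria", v), ("Eukaryota", le)] := by
  apply PySem.Dict.ext
  rw [PySem.Dict.items_insert_of_contains] <;> simp

theorem ins3_euk (la lb le v : List String) :
    (PySem.Dict.mk [("Archaea", la), ("Bacteria", lb), ("Eukaryota", le)]).insert "Eukaryota" v =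
    PySem.Dict.mk [("Archaea", la), ("Bacteria", lb), ("Eukaryota", v)] := by
  apply PySem.Dict.ext
  rw [PySem.Dict.items_insert_of_contains] <;> simp

theorem contains_add_self (s : PySem.Set String) (x : String) :
    PySem.Set.contains (PySem.Set.add s x) x = true := by
  rw [PySem.Set.contains_iff, PySem.Set.mem_add]
  exact Or.inr rfl

theorem contains_add_ne (s : PySem.Set String) (x y : String) (h : x ≠ y) :
    PySem.Set.contains (PySem.Set.add s x) y = PySem.Set.contains s y := by
  rw [Bool.eq_iff_iff, PySem.Set.contains_iff, PySem.Set.contains_iff, PySem.Set.mem_add]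
  constructor
  · rintro (h1 | h1)
    · exact h1
    · exact absurd h1.symm h
  · exact Or.inl

theorem get3_arc (la lb le : List String) :
    (PySem.Dict.mk [("Archaea", la), ("Bacteria", lb), ("Eukaryota", le)]).get? "Archaea" = some la := by
  simp [PySem.Dict.get?_mk_cons]

theorem get3_bac (la lb le : List String) :
    (PySem.Dict.mk [("Archaea", la), ("Bacteria", lb), ("Eukaryota", le)]).get? "Bacteria" = some lb := by
  simp [PySem.Dict.get?_mk_cons]

theorem get3_euk (la lb le : List String) :
    (PySem.Dict.mk [("Archaea", la), ("Bacteria", lb), ("Eukaryota", le)]).get? "Eukaryota" = some le := by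
  simp [PySem.Dict.get?_mk_cons]

theorem count_pos (l : List String) (h : l ≠ []) : 0 < ((PySem.Set.ofList l).length : Int) := by
  cases l with
  | nil => simp at h
  | cons x t => rw [PySem.Set.ofList_cons]; simp

-- the two loops, run in step, keep: a kingdom is in B's set iff A's list for it is nonempty
theorem loop_inv (dicoGrpSp dicoSpGene : List (String × String)) :
    ∀ (gl : List String) (la lb le : List String) (s : PySem.Set String),
    (∀ g ∈ gl,
      ((List.lookup g dicoSpGene).all (fun sp =>
        (List.lookup sp dicoGrpSp == some "Archaea") ||
        (List.lookup sp dicoGrpSp == some "Bacteria") ||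
        (List.lookup sp dicoGrpSp == some "Eukaryota"))) = true) →
    (PySem.Set.contains s "Archaea" = !la.isEmpty) →
    (PySem.Set.contains s "Bacteria" = !lb.isEmpty) →
    (PySem.Set.contains s "Eukaryota" = !le.isEmpty) →
    ∃ la' lb' le',
      gl.foldl (aStep dicoGrpSp dicoSpGene)
        (PySem.Dict.mk [("Archaea", la), ("Bacteria", lb), ("Eukaryota", le)]) =
        PySem.Dict.mk [("Archaea", la'), ("Bacteria", lb'), ("Eukaryota", le')] ∧
      (PySem.Set.contains (gl.foldl (bStep dicoGrpSp dicoSpGene) s) "Archaea" = !la'.isEmpty) ∧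
      (PySem.Set.contains (gl.foldl (bStep dicoGrpSp dicoSpGene) s) "Bacteria" = !lb'.isEmpty) ∧
      (PySem.Set.contains (gl.foldl (bStep dicoGrpSp dicoSpGene) s) "Eukaryota" = !le'.isEmpty) := by
  intro gl
  induction gl with
  | nil =>
    intro la lb le s _ h1 h2 h3
    exact ⟨la, lb, le, rfl, h1, h2, h3⟩
  | cons g gl ih =>
    intro la lb le s hpre h1 h2 h3
    have hg := hpre g (List.mem_cons_self ..)
    have htl := fun x hx => hpre x (List.mem_cons_of_mem g hx)
    simp only [List.foldl_cons]
    cases hcase : List.lookup g dicoSpGene with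
    | none =>
      simp only [aStep, bStep, hcase]
      exact ih la lb le s htl h1 h2 h3
    | some sp =>
      rw [hcase] at hg
      simp only [Option.all_some, Bool.or_eq_true, beq_iff_eq] at hg
      rcases hg with ((hk | hk) | hk)
      · -- grp = "Archaea"
        simp only [aStep, bStep, hcase, hk, get3_arc, ins3_arc]
        exact ih (la ++ [sp]) lb le (PySem.Set.add s "Archaea") htl
          (by rw [contains_add_self]; simp)
          (by rw [contains_add_ne _ _ _ (by decide)]; exact h2)
          (by rw [contains_add_ne _ _ _ (by decide)]; exact h3)
      · -- grp = "Bacteria"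
        simp only [aStep, bStep, hcase, hk, get3_bac, ins3_bac]
        exact ih la (lb ++ [sp]) le (PySem.Set.add s "Bacteria") htl
          (by rw [contains_add_ne _ _ _ (by decide)]; exact h1)
          (by rw [contains_add_self]; simp)
          (by rw [contains_add_ne _ _ _ (by decide)]; exact h3)
      · -- grp = "Eukaryota"
        simp only [aStep, bStep, hcase, hk, get3_euk, ins3_euk]
        exact ih la lb (le ++ [sp]) (PySem.Set.add s "Eukaryota") htl
          (by rw [contains_add_ne _ _ _ (by decide)]; exact h1)
          (by rw [contains_add_ne _ _ _ (by decide)]; exact h2)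
          (by rw [contains_add_self]; simp)

-- both final computations, as functions of the loop results, agree
theorem final_eq (la lb le : List String) (s : PySem.Set String)
    (h1 : PySem.Set.contains s "Archaea" = !la.isEmpty)
    (h2 : PySem.Set.contains s "Bacteria" = !lb.isEmpty)
    (h3 : PySem.Set.contains s "Eukaryota" = !le.isEmpty) :
    (if ((PySem.Set.ofList la).length : Int) > 0 ∧ ((PySem.Set.ofList lb).length : Int) > 0 ∧ ((PySem.Set.ofList le).length : Int) > 0 then some "ArcBacEuk"
     else if ((PySem.Set.ofList la).length : Int) > 0 ∧ ((PySem.Set.ofList lb).length : Int) > 0 ∧ ((PySem.Set.ofList le).length : Int) = 0 then some "ArcBac"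
     else if ((PySem.Set.ofList la).length : Int) = 0 ∧ ((PySem.Set.ofList lb).length : Int) > 0 ∧ ((PySem.Set.ofList le).length : Int) > 0 then some "BacEuk"
     else if ((PySem.Set.ofList la).length : Int) > 0 ∧ ((PySem.Set.ofList lb).length : Int) = 0 ∧ ((PySem.Set.ofList le).length : Int) > 0 then some "ArcEuk"
     else if ((PySem.Set.ofList la).length : Int) > 0 ∧ ((PySem.Set.ofList lb).length : Int) = 0 ∧ ((PySem.Set.ofList le).length : Int) = 0 then some "Arc"
     else if ((PySem.Set.ofList la).length : Int) = 0 ∧ ((PySem.Set.ofList lb).length : Int) > 0 ∧ ((PySem.Set.ofList le).length : Int) = 0 then some "Bac"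
     else if ((PySem.Set.ofList la).length : Int) = 0 ∧ ((PySem.Set.ofList lb).length : Int) = 0 ∧ ((PySem.Set.ofList le).length : Int) > 0 then some "Euk"
     else none) =
    (if (PySem.Str.join ""
        ((([("Archaea", "Arc"), ("Bacteria", "Bac"), ("Eukaryota", "Euk")].filter
            (fun p => PySem.Set.contains s p.1))).map (·.2)) == "") then none
     else some (PySem.Str.join ""
        ((([("Archaea", "Arc"), ("Bacteria", "Bac"), ("Eukaryota", "Euk")].filter
            (fun p => PySem.Set.contains s p.1))).map (·.2)))) := by
  rcases la with _ | ⟨x, la⟩ <;> rcases lb with _ | ⟨y, lb⟩ <;> rcases le with _ | ⟨z, le⟩ <;>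
    simp only [List.isEmpty_nil, List.isEmpty_cons, Bool.not_true, Bool.not_false] at h1 h2 h3 <;>
    simp only [List.filter, h1, h2, h3]
  all_goals (try have pa := count_pos (x :: la) (by simp))
  all_goals (try have pb := count_pos (y :: lb) (by simp))
  all_goals (try have pe := count_pos (z :: le) (by simp))
  all_goals have q : ((PySem.Set.ofList ([] : List String)).length : Int) = 0 := rfl
  all_goals split_ifs <;>
    first
      | decide
      | omega
      | (exact absurd (by assumption) (by decide))

-- ===== VERDICT (by name: the statement is the Claim_ definition above) =====
theorem getGrpSpOrthoGrp_spec : Claim_equal_getGrpSpOrthoGrp := by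
  intro geneList dicoGrpSp dicoSpGene _ hpre
  obtain ⟨la, lb, le, hA, h1, h2, h3⟩ :=
    loop_inv dicoGrpSp dicoSpGene geneList [] [] [] PySem.Set.empty hpre (by simp) (by simp) (by simp)
  unfold Spec_getGrpSpOrthoGrp getGrpSpOrthoGrp getGrpSpOrthoGrp_alt
  simp only [hA]
  exact final_eq la lb le _ h1 h2 h3
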